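-- pv_equiv track=rewrite | github.com/growgraph/GraFlo | graphcast/util/merge.py | merge_doc_basis_closest_preceding
-- ===== SOURCE A (Python) =====
-- def merge_doc_basis_closest_preceding(
--     docs: list[dict],
--     index_keys: tuple[str, ...],
-- ) -> list[dict]:
--     """Merge documents based on index_keys.
--
--     Leading non-ID docs are merged into the first ID doc.
--     Remaining non-ID docs are merged into the closest preceding ID doc.
--
--     Args:
--         docs: List of documents to merge
--         index_keys: Tuple of key names to use for merging
--
--     Returns:
--         list[dict]: Merged documents
--     """
--     merged_docs: list[dict] = []
--     pending_non_ids: list[dict] = []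
--
--     for doc in docs:
--         if any(k in doc for k in index_keys):
--             # This is an ID document
--             # First, handle any accumulated non-ID docs
--             if pending_non_ids:
--                 if not merged_docs:
--                     # No previous ID doc, create new one with accumulated non-IDs
--                     merged_doc = {}
--                     for non_id in pending_non_ids:
--                         merged_doc.update(non_id)
--                     merged_docs.append(merged_doc)
--                 else:
--                     # Merge accumulated non-IDs into the last ID doc
--                     for non_id in pending_non_ids:
--                         merged_docs[-1].update(non_id)
--                 pending_non_ids.clear()
--
--             # Add the current ID document
--             merged_docs.append(doc.copy())
--         else:
--             # This is a non-ID document, accumulate it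
--             pending_non_ids.append(doc)
--
--     # Handle any remaining non-ID docs at the end
--     if pending_non_ids and merged_docs:
--         for non_id in pending_non_ids:
--             merged_docs[-1].update(non_id)
--
--     return merged_docs
-- ===== SOURCE B (Python) =====
-- def merge_doc_basis_closest_preceding(
--     docs: list[dict],
--     index_keys: tuple[str, ...],
-- ) -> list[dict]:
--     """Segment-based rewrite: locate the first ID doc, emit the leading
--     non-ID group (if any) as its own dict, then sweep once keeping the
--     current open segment and closing it whenever a new ID doc starts."""
--     def is_id(d):
--         return any(k in d for k in index_keys)
--
--     i = 0
--     while i < len(docs) and not is_id(docs[i]):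
--         i += 1
--     if i == len(docs):
--         return []
--     out: list[dict] = []
--     if i > 0:
--         lead: dict = {}
--         for d in docs[:i]:
--             lead.update(d)
--         out.append(lead)
--     cur = dict(docs[i])
--     for d in docs[i + 1:]:
--         if is_id(d):
--             out.append(cur)
--             cur = dict(d)
--         else:
--             cur.update(d)
--     out.append(cur)
--     return out
-- ===== Notes on version B (the rewrite author's own statement) =====
-- stated objective: alternative
-- what changed: Replaces the streaming pending-list accumulator (flushed into merged_docs[-1] on each new ID doc and at the end) with a segment decomposition: find the first ID position, emit the merged leading non-ID group once, then a single sweep that keeps the current open segment dict and closes it when the next ID doc starts.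
import Mathlib
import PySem

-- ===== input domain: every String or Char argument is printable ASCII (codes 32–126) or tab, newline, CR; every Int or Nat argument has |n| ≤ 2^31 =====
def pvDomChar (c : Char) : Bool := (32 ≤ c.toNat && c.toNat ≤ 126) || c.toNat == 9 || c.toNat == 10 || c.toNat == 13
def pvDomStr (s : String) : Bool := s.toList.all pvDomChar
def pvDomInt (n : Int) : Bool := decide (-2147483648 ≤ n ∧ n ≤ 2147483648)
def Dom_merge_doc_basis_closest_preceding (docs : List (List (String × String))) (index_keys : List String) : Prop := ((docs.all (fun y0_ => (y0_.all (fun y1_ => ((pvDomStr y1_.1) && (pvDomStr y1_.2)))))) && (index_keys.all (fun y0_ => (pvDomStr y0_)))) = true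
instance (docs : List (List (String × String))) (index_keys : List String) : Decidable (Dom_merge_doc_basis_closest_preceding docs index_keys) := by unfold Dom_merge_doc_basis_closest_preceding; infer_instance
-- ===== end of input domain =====

-- B replaces A's streaming pending-accumulator with a segment decomposition
-- (leading group, then one sweep with an open current segment); same cost, alternative structure.


-- shared dict primitives (both Pythons use `k in doc`, `dict.update`, `d.copy()`/`dict(d)`)
-- `any(k in doc for k in index_keys)`
def pvIsId (index_keys : List String) (doc : List (String × String)) : Bool :=
  index_keys.any (fun k => (PySem.Dict.mk doc).contains k)
-- `m.update(e)` (the updated dict's items)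
def pvUpd (m e : List (String × String)) : List (String × String) :=
  ((PySem.Dict.mk m).update e).items
-- `doc.copy()` / `dict(doc)`
def pvCopy (doc : List (String × String)) : List (String × String) :=
  (PySem.Dict.ofList doc).items

-- ===== PORT A =====
-- `for non_id in pending: merged_docs[-1].update(non_id)` — update the LAST element in place
def pvFlushLast (merged pending : List (List (String × String))) : List (List (String × String)) :=
  match merged with
  | [] => []
  | [m] => [pending.foldl pvUpd m]
  | m :: rest => m :: pvFlushLast rest pending

-- A's loop body over state (merged_docs, pending_non_ids)
def pvStepA (index_keys : List String)
    (st : List (List (String × String)) × List (List (String × String)))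
    (doc : List (String × String)) :
    List (List (String × String)) × List (List (String × String)) :=
  if pvIsId index_keys doc then
    let merged :=
      if st.2.isEmpty then st.1
      else if st.1.isEmpty then [st.2.foldl pvUpd []]
      else pvFlushLast st.1 st.2
    (merged ++ [pvCopy doc], [])
  else (st.1, st.2 ++ [doc])

-- trailing `if pending_non_ids and merged_docs: ...`
def pvFinishA (st : List (List (String × String)) × List (List (String × String))) :
    List (List (String × String)) :=
  if !st.2.isEmpty && !st.1.isEmpty then pvFlushLast st.1 st.2 else st.1

def merge_doc_basis_closest_preceding (docs : List (List (String × String))) (index_keys : List String) : List (List (String × String)) :=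
  pvFinishA (docs.foldl (pvStepA index_keys) ([], []))

-- ===== PORT B =====
-- B's main sweep: `for d in docs[i+1:]: ...` then the final `out.append(cur)`
def pvSweepB (index_keys : List String) (out : List (List (String × String)))
    (cur : List (String × String)) : List (List (String × String)) → List (List (String × String))
  | [] => out ++ [cur]
  | d :: tl =>
    if pvIsId index_keys d then pvSweepB index_keys (out ++ [cur]) (pvCopy d) tl
    else pvSweepB index_keys out (pvUpd cur d) tl

def merge_doc_basis_closest_preceding_alt (docs : List (List (String × String))) (index_keys : List String) : List (List (String × String)) :=
  -- the initial `while` loop computing i: docs[:i] / docs[i:]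
  let lead := docs.takeWhile (fun d => !pvIsId index_keys d)
  match docs.dropWhile (fun d => !pvIsId index_keys d) with
  | [] => []
  | d :: tl =>
    let out := if lead.isEmpty then [] else [lead.foldl pvUpd []]
    pvSweepB index_keys out (pvCopy d) tl

-- ===== PRECONDITION & SPEC =====
def Spec_merge_doc_basis_closest_preceding (docs : List (List (String × String))) (index_keys : List String) (out : List (List (String × String))) : Prop := out = merge_doc_basis_closest_preceding_alt docs index_keys
instance (docs : List (List (String × String))) (index_keys : List String) (out : List (List (String × String))) : Decidable (Spec_merge_doc_basis_closest_preceding docs index_keys out) := by unfold Spec_merge_doc_basis_closest_preceding; infer_instance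

-- ===== CLAIM (what is proved, stated in full; the proofs are below) =====
def Claim_equal_merge_doc_basis_closest_preceding : Prop := ∀ (docs : List (List (String × String))) (index_keys : List String), Dom_merge_doc_basis_closest_preceding docs index_keys → Spec_merge_doc_basis_closest_preceding docs index_keys (merge_doc_basis_closest_preceding docs index_keys)

-- ===== LEMMAS AND PROOFS =====

-- the open-segment view of B's sweep (cur prepended instead of out passed along)
def pvProc (ik : List String) (cur : List (String × String)) :
    List (List (String × String)) → List (List (String × String))
  | [] => [cur]
  | d :: tl =>
    if pvIsId ik d then cur :: pvProc ik (pvCopy d) tl else pvProc ik (pvUpd cur d) tl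

theorem pvSweepB_eq_proc (ik : List String) (l : List (List (String × String)))
    (out : List (List (String × String))) (cur : List (String × String)) :
    pvSweepB ik out cur l = out ++ pvProc ik cur l := by
  induction l generalizing out cur with
  | nil => simp [pvSweepB, pvProc]
  | cons d tl ih =>
    simp only [pvSweepB, pvProc]
    by_cases h : pvIsId ik d
    · simp [h, ih]
    · simp [h, ih]

theorem pvFlushLast_concat (ms : List (List (String × String)))
    (m : List (String × String)) (p : List (List (String × String))) :
    pvFlushLast (ms ++ [m]) p = ms ++ [p.foldl pvUpd m] := by
  induction ms with
  | nil => simp [pvFlushLast]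
  | cons a t ih =>
    cases h : t ++ [m] with
    | nil => simp at h
    | cons b u =>
      simp only [List.cons_append, h, pvFlushLast]
      rw [← h, ih]

-- A's fold started from a state with nonempty merged list ms ++ [m] and pending p
theorem pvMainA (ik : List String) (l : List (List (String × String)))
    (ms : List (List (String × String))) (m : List (String × String))
    (p : List (List (String × String))) :
    pvFinishA (l.foldl (pvStepA ik) (ms ++ [m], p)) = ms ++ pvProc ik (p.foldl pvUpd m) l := by
  induction l generalizing ms m p with
  | nil =>
    simp only [List.foldl_nil, pvFinishA, pvProc]
    by_cases hp : p.isEmpty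
    · obtain rfl := List.isEmpty_iff.mp hp
      simp
    · simp [hp, pvFlushLast_concat]
  | cons d tl ih =>
    simp only [List.foldl_cons, pvStepA]
    by_cases hd : pvIsId ik d
    · have hmerg :
          (if (ms ++ [m], p).2.isEmpty then (ms ++ [m], p).1
           else if (ms ++ [m], p).1.isEmpty then [(ms ++ [m], p).2.foldl pvUpd []]
           else pvFlushLast (ms ++ [m], p).1 (ms ++ [m], p).2) = ms ++ [p.foldl pvUpd m] := by
        by_cases hp : p.isEmpty
        · obtain rfl := List.isEmpty_iff.mp hp
          simp
        · rw [if_neg (by simpa using hp), if_neg (by simp)]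
          exact pvFlushLast_concat ms m p
      simp only [hd, if_true, hmerg]
      have := ih (ms ++ [p.foldl pvUpd m]) (pvCopy d) []
      simp only [List.foldl_nil] at this
      rw [this]
      simp [pvProc, hd]
    · simp only [hd, if_false, Bool.false_eq_true]
      rw [ih ms m (p ++ [d])]
      simp [pvProc, hd, List.foldl_append]

-- A's fold while merged_docs is still empty (the leading non-ID phase)
theorem pvLeadA (ik : List String) (l : List (List (String × String)))
    (p : List (List (String × String))) :
    pvFinishA (l.foldl (pvStepA ik) ([], p)) =
      match l.dropWhile (fun d => !pvIsId ik d) with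
      | [] => []
      | d :: tl =>
        (if (p ++ l.takeWhile (fun d => !pvIsId ik d)).isEmpty then []
         else [(p ++ l.takeWhile (fun d => !pvIsId ik d)).foldl pvUpd []]) ++
          pvProc ik (pvCopy d) tl := by
  induction l generalizing p with
  | nil => simp [pvFinishA]
  | cons d tl ih =>
    simp only [List.foldl_cons, pvStepA, List.dropWhile_cons, List.takeWhile_cons]
    by_cases hd : pvIsId ik d
    · simp only [hd, Bool.not_true, Bool.false_eq_true, if_false, if_true]
      by_cases hp : p.isEmpty
      · obtain rfl := List.isEmpty_iff.mp hp
        have h1 := pvMainA ik tl [] (pvCopy d) []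
        simp only [List.nil_append, List.foldl_nil] at h1
        simp [h1]
      · have h1 := pvMainA ik tl [List.foldl pvUpd [] p] (pvCopy d) []
        simp only [List.foldl_nil, List.singleton_append] at h1
        simp [hp, h1]
    · simp only [hd, Bool.false_eq_true, if_false, Bool.not_false, if_true]
      rw [ih (p ++ [d])]
      simp [List.append_assoc]

-- ===== VERDICT (by name: the statement is the Claim_ definition above) =====
theorem merge_doc_basis_closest_preceding_spec : Claim_equal_merge_doc_basis_closest_preceding := by
  intro docs ik _
  show _ = _
  unfold merge_doc_basis_closest_preceding merge_doc_basis_closest_preceding_alt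
  rw [pvLeadA ik docs []]
  cases h : docs.dropWhile (fun d => !pvIsId ik d) with
  | nil => simp
  | cons d tl => simp [pvSweepB_eq_proc]
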